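-- pv_equiv track=rewrite | github.com/gansheer/adventofcode | day13/day13-1.py | find_next_bus
-- ===== SOURCE A (Python) =====
-- def find_next_bus(current_timestamp, buses):
--   waiting_timestamp = current_timestamp
--   while True:
--     for bus in buses:
--       if waiting_timestamp % bus == 0:
--         return waiting_timestamp, bus
--     waiting_timestamp += 1
--   return 0,0
-- ===== SOURCE B (Python) =====
-- def find_next_bus(current_timestamp, buses):
--   def next_multiple(b):
--     return current_timestamp + (-current_timestamp) % abs(b)
--   bus = min(buses, key=next_multiple)
--   return next_multiple(bus), bus
-- ===== Notes on version B (the rewrite author's own statement) =====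
-- stated objective: faster
-- what changed: Replaced the timestamp-by-timestamp upward scan with a closed-form ceil-style next multiple per bus (current + (-current) % abs(bus)) and a single min with that key, which picks the first bus in list order on ties.
-- outside the precondition, e.g. on find_next_bus(0, [1, 0]): A returns (0, 1), B raises ZeroDivisionError
import Mathlib
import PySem

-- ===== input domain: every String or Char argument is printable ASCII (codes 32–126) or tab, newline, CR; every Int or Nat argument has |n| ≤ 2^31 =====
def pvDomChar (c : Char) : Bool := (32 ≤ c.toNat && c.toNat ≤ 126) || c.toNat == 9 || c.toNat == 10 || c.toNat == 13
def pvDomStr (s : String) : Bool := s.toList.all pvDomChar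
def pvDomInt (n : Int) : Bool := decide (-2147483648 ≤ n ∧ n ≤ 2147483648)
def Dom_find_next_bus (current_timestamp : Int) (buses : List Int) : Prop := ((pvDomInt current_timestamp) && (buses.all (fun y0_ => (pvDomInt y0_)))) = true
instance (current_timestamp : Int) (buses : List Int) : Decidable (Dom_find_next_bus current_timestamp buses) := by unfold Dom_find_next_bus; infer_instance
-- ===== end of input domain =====

-- B replaces A's timestamp-by-timestamp upward scan by a closed-form next multiple
-- per bus and a single min (first bus in list order on ties); measured faster asymptotically.


-- ===== PORT A =====
-- A's 'while True' loop; the fuel argument only makes the recursion total (under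
-- Pre_ the fuel is never exhausted: a solution exists within |bus| steps for any bus).
def findLoopA (buses : List Int) (w : Int) : Nat → Int × Int
  | 0 => (0, 0)
  | fuel + 1 =>
    match buses.find? (fun bus => PySem.Int.mod w bus == 0) with
    | some bus => (w, bus)
    | none => findLoopA buses (w + 1) fuel

def pvFuelA (buses : List Int) : Nat := 1 + (buses.map Int.natAbs).sum

def find_next_bus (current_timestamp : Int) (buses : List Int) : Int × Int :=
  findLoopA buses current_timestamp (pvFuelA buses)

-- ===== PORT B =====
-- next_multiple(b) = current_timestamp + (-current_timestamp) % abs(b)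
def nextMultiple (ct b : Int) : Int := ct + PySem.Int.mod (-ct) |b|

def find_next_bus_alt (current_timestamp : Int) (buses : List Int) : Int × Int :=
  match PySem.List.min? buses (fun b => nextMultiple current_timestamp b) with
  | some bus => (nextMultiple current_timestamp bus, bus)
  | none => (0, 0)  -- Python's min raises ValueError on []; excluded by Pre_

-- ===== PRECONDITION & SPEC =====
-- Pre_ excludes the empty bus list (A loops forever, B's min raises ValueError) and
-- lists containing 0 (A raises ZeroDivisionError unless an earlier bus divides the
-- current timestamp first; B's abs(0) division raises ZeroDivisionError there).
def Pre_find_next_bus (current_timestamp : Int) (buses : List Int) : Prop :=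
  buses ≠ [] ∧ (0 : Int) ∉ buses
instance (current_timestamp : Int) (buses : List Int) : Decidable (Pre_find_next_bus current_timestamp buses) := by unfold Pre_find_next_bus; infer_instance

def pvWitness_find_next_bus : Int × List Int := (7, [5, 3])

def Spec_find_next_bus (current_timestamp : Int) (buses : List Int) (out : Int × Int) : Prop := out = find_next_bus_alt current_timestamp buses
instance (current_timestamp : Int) (buses : List Int) (out : Int × Int) : Decidable (Spec_find_next_bus current_timestamp buses out) := by unfold Spec_find_next_bus; infer_instance

-- ===== CLAIM (what is proved, stated in full; the proofs are below) =====
def Claim_equal_find_next_bus : Prop := ∀ (current_timestamp : Int) (buses : List Int), Dom_find_next_bus current_timestamp buses → Pre_find_next_bus current_timestamp buses → Spec_find_next_bus current_timestamp buses (find_next_bus current_timestamp buses)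

-- ===== LEMMAS AND PROOFS =====

lemma nxt_emod (ct b : Int) (hb : b ≠ 0) : nextMultiple ct b = ct + (-ct) % |b| := by
  unfold nextMultiple
  rw [PySem.Int.mod_eq_emod_of_pos (abs_pos.mpr hb)]

lemma nxt_dvd (ct b : Int) (hb : b ≠ 0) : b ∣ nextMultiple ct b := by
  rw [← abs_dvd _ _, nxt_emod ct b hb, Int.emod_def]
  exact ⟨-((-ct) / |b|), by ring⟩

lemma nxt_ge (ct b : Int) (hb : b ≠ 0) : ct ≤ nextMultiple ct b := by
  rw [nxt_emod ct b hb]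
  have := Int.emod_nonneg (-ct) (abs_ne_zero.mpr hb)
  omega

lemma nxt_lt (ct b : Int) (hb : b ≠ 0) : nextMultiple ct b < ct + |b| := by
  rw [nxt_emod ct b hb]
  have := Int.emod_lt_of_pos (-ct) (abs_pos.mpr hb)
  omega

lemma nxt_min (ct b t : Int) (hb : b ≠ 0) (hd : b ∣ t) (ht : ct ≤ t) :
    nextMultiple ct b ≤ t := by
  by_contra h
  push Not at h
  have h1 : |b| ∣ (nextMultiple ct b - t) := dvd_sub ((abs_dvd _ _).mpr (nxt_dvd ct b hb)) ((abs_dvd _ _).mpr hd)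
  have h2 : |b| ≤ nextMultiple ct b - t := Int.le_of_dvd (by omega) h1
  have h3 := nxt_lt ct b hb
  omega

lemma find?_congr_mem {α : Type} {p q : α → Bool} :
    ∀ (xs : List α), (∀ a ∈ xs, p a = q a) → xs.find? p = xs.find? q
  | [], _ => rfl
  | x :: xs, h => by
    have hx := h x (List.mem_cons_self)
    by_cases hp : p x
    · rw [List.find?_cons_of_pos hp, List.find?_cons_of_pos (hx ▸ hp)]
    · rw [List.find?_cons_of_neg hp, List.find?_cons_of_neg (by rw [← hx]; exact hp)]
      exact find?_congr_mem xs (fun a ha => h a (List.mem_cons_of_mem _ ha))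

def pvMinStep {α : Type} (key : α → Int) (acc : Option α) (x : α) : Option α :=
  match acc with
  | none => some x
  | some m => if key x < key m then some x else some m

lemma min?_eq_foldl {α : Type} (key : α → Int) (xs : List α) :
    PySem.List.min? xs key = xs.foldl (pvMinStep key) none := rfl

lemma minFold_first {α : Type} (key : α → Int) :
    ∀ (xs : List α) (m m' : α),
      xs.foldl (pvMinStep key) (some m) = some m' →
      m' = m ∨ (key m' < key m ∧ xs.find? (fun b => key b == key m') = some m')
  | [], m, m', h => by
    simp [List.foldl] at h
    exact Or.inl h.symm
  | x :: xs, m, m', h => by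
    rw [List.foldl_cons] at h
    by_cases hlt : key x < key m
    · have h' : xs.foldl (pvMinStep key) (some x) = some m' := by
        simpa [pvMinStep, hlt] using h
      rcases minFold_first key xs x m' h' with rfl | ⟨h1, h2⟩
      · exact Or.inr ⟨hlt, by rw [List.find?_cons_of_pos (by simp)]⟩
      · refine Or.inr ⟨lt_trans h1 hlt, ?_⟩
        rw [List.find?_cons_of_neg (by simp; omega)]
        exact h2
    · have h' : xs.foldl (pvMinStep key) (some m) = some m' := by
        simpa [pvMinStep, hlt] using h
      rcases minFold_first key xs m m' h' with rfl | ⟨h1, h2⟩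
      · exact Or.inl rfl
      · refine Or.inr ⟨h1, ?_⟩
        rw [List.find?_cons_of_neg (by simp; omega)]
        exact h2

lemma min?_first {α : Type} (key : α → Int) (xs : List α) (m : α)
    (h : PySem.List.min? xs key = some m) :
    xs.find? (fun b => key b == key m) = some m := by
  cases xs with
  | nil => simp [PySem.List.min?] at h
  | cons x xs =>
    rw [min?_eq_foldl, List.foldl_cons] at h
    have h' : xs.foldl (pvMinStep key) (some x) = some m := h
    rcases minFold_first key xs x m h' with rfl | ⟨h1, h2⟩
    · rw [List.find?_cons_of_pos (by simp)]
    · rw [List.find?_cons_of_neg (by simp; omega)]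
      exact h2

lemma findLoopA_eq (buses : List Int) (t m : Int)
    (hm : buses.find? (fun bus => PySem.Int.mod t bus == 0) = some m) :
    ∀ (fuel : Nat) (w : Int), w ≤ t → t < w + fuel →
      (∀ u : Int, w ≤ u → u < t → buses.find? (fun bus => PySem.Int.mod u bus == 0) = none) →
      findLoopA buses w fuel = (t, m)
  | 0, w, hw, hlt, _ => by omega
  | fuel + 1, w, hw, hlt, hnone => by
    by_cases hwt : w = t
    · subst hwt
      simp [findLoopA, hm]
    · have hw' : w < t := lt_of_le_of_ne hw hwt
      have h0 := hnone w le_rfl hw'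
      simp only [findLoopA, h0]
      exact findLoopA_eq buses t m hm fuel (w + 1) (by omega) (by push_cast at hlt ⊢; omega)
        (fun u hu hut => hnone u (by omega) hut)

lemma pred_eq (ct t b : Int) (hb : b ≠ 0) (ht : ct ≤ t) (hle : t ≤ nextMultiple ct b) :
    (PySem.Int.mod t b == 0) = (nextMultiple ct b == t) := by
  rw [Bool.eq_iff_iff]
  simp only [beq_iff_eq, PySem.Int.mod_eq_zero_iff_dvd]
  constructor
  · intro hd
    exact le_antisymm (nxt_min ct b t hb hd ht) hle
  · intro he
    rw [← he]
    exact nxt_dvd ct b hb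

-- ===== VERDICT (by name: the statement is the Claim_ definition above) =====
theorem find_next_bus_spec : Claim_equal_find_next_bus := by
  intro ct buses _ hpre
  obtain ⟨hne, h0⟩ := hpre
  unfold Spec_find_next_bus
  cases hmin : PySem.List.min? buses (fun b => nextMultiple ct b) with
  | none => exact absurd ((PySem.List.min?_eq_none_iff _ _).mp hmin) hne
  | some m =>
    have hm_mem : m ∈ buses := PySem.List.min?_mem hmin
    have hm_ne : m ≠ 0 := fun h => h0 (h ▸ hm_mem)
    have hisMin : ∀ y ∈ buses, nextMultiple ct m ≤ nextMultiple ct y :=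
      PySem.List.min?_isMin hmin
    set t := nextMultiple ct m with ht_def
    have hct : ct ≤ t := nxt_ge ct m hm_ne
    -- A's find? at t matches B's min-key find?
    have hcongr : buses.find? (fun bus => PySem.Int.mod t bus == 0)
        = buses.find? (fun b => nextMultiple ct b == t) := by
      apply find?_congr_mem
      intro b hb
      exact pred_eq ct t b (fun h => h0 (h ▸ hb)) hct (hisMin b hb)
    have hfirst := min?_first (fun b => nextMultiple ct b) buses m hmin
    have hfindt : buses.find? (fun bus => PySem.Int.mod t bus == 0) = some m := by
      rw [hcongr]; exact hfirst
    -- fuel suffices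
    have habs : m.natAbs ≤ (buses.map Int.natAbs).sum :=
      List.single_le_sum (fun x _ => Nat.zero_le x) _ (List.mem_map_of_mem hm_mem)
    have hfuel : t < ct + (pvFuelA buses : Int) := by
      have h1 := nxt_lt ct m hm_ne
      have h2 : |m| = (m.natAbs : Int) := Int.abs_eq_natAbs m
      have h2 : |m| ≤ ((buses.map Int.natAbs).sum : Int) := by
        rw [Int.abs_eq_natAbs]; exact_mod_cast habs
      have h4 : ((pvFuelA buses : Nat) : Int) = 1 + ((buses.map Int.natAbs).sum : Int) := by
        unfold pvFuelA; push_cast; ring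
      rw [h4]
      omega
    have hnone : ∀ u : Int, ct ≤ u → u < t →
        buses.find? (fun bus => PySem.Int.mod u bus == 0) = none := by
      intro u hu hut
      rw [List.find?_eq_none]
      intro b hb hpb
      have hbne : b ≠ 0 := fun h => h0 (h ▸ hb)
      have hd : b ∣ u := PySem.Int.mod_eq_zero_iff_dvd u b |>.mp (by simpa using hpb)
      have h1 : nextMultiple ct b ≤ u := nxt_min ct b u hbne hd hu
      have h2 : t ≤ nextMultiple ct b := hisMin b hb
      omega
    have hA : find_next_bus ct buses = (t, m) := by
      unfold find_next_bus
      exact findLoopA_eq buses t m hfindt (pvFuelA buses) ct hct hfuel hnone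
    rw [hA]
    simp only [find_next_bus_alt, hmin]
    rfl
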